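-- pv_equiv track=rewrite | github.com/posl/comment_recommendation | script/split_gen/4_time/zh/220_C/6.py | solve
-- ===== SOURCE A (Python) =====
-- def solve(n, a, x):
--   sum = 0
--   i = 0
--   while True:
--     sum += a[i % n]
--     i += 1
--     if sum > x:
--       return i
-- ===== SOURCE B (Python) =====
-- def solve(n, a, x):
--     cyc = a[:n]
--     pref = []
--     s = 0
--     for v in cyc:
--         s += v
--         pref.append(s)
--     best = max(pref)
--     if best > x:
--         for j, p in enumerate(pref):
--             if p > x:
--                 return j + 1
--     S = pref[-1]
--     k = (x - best) // S + 1
--     rem = x - k * S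
--     for j, p in enumerate(pref):
--         if p > rem:
--             return k * n + j + 1
-- ===== Notes on version B (the rewrite author's own statement) =====
-- stated objective: alternative
-- what changed: Replaces the one-step-at-a-time cyclic summing loop by one prefix-sum pass over the cycle plus a floor-division that accounts for all full cycles at once, then a single scan of the last partial cycle.
-- outside the precondition, e.g. on solve(-1, [5], 3): A returns 1, B raises ValueError; on solve(-1, [5, 7], 3): A returns 1, B returns 1; on solve(-1, [2, 9], 3): A returns 2, B returns 0
import Mathlib
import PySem

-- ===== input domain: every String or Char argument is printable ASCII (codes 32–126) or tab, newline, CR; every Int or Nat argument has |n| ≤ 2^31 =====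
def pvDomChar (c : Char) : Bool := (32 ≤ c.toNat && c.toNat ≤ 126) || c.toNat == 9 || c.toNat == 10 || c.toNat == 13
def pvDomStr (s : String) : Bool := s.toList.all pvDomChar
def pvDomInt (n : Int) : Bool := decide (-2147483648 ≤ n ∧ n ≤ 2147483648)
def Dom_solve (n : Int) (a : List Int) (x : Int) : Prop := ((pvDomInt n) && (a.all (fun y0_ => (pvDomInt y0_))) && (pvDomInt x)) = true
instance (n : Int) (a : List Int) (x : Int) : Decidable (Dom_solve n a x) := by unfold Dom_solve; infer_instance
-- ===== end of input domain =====

-- B replaces A's step-by-step cyclic summing with a prefix-sum pass plus a floor-division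
-- that accounts for all full cycles at once (an alternative algorithm computing the same value).

-- ===== PORT A =====
-- A's 'while True' loop; the fuel only makes it total (A diverges when the cycle sum is ≤ 0
-- and no first-cycle prefix exceeds x); under Pre_solve the fuel is proved sufficient.
def solveLoop (n x : Int) (a : List Int) : Nat → Int → Int → Int
  | 0, _, _ => 0
  | fuel+1, sum, i =>
      let sum' := sum + PySem.List.pyGetD a (PySem.Int.mod i n) 0
      let i' := i + 1
      if sum' > x then i' else solveLoop n x a fuel sum' i'

def solve (n : Int) (a : List Int) (x : Int) : Int :=
  solveLoop n x a ((x.natAbs + (a.map Int.natAbs).sum + 1) * n.toNat + n.toNat + 1) 0 0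

-- ===== PORT B =====
-- the two 'for j, p in enumerate(pref): if p > t: return j + 1' scans of Source B
def firstExceed (t : Int) : List Int → Nat → Option Nat
  | [], _ => none
  | p :: rest, j => if p > t then some (j + 1) else firstExceed t rest (j + 1)

def solve_alt (n : Int) (a : List Int) (x : Int) : Int :=
  let cyc := PySem.List.slice a none (some n)
  let pref := (cyc.foldl (fun (st : List Int × Int) v => (st.1 ++ [st.2 + v], st.2 + v)) ([], 0)).1
  let best := (PySem.List.max? pref (fun y => y)).getD 0
  if best > x then
    match firstExceed x pref 0 with
    | some j => (j : Int)
    | none => 0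
  else
    let S := PySem.List.pyGetD pref (-1) 0
    let k := PySem.Int.floordiv (x - best) S + 1
    let rem := x - k * S
    match firstExceed rem pref 0 with
    | some j => k * n + (j : Int)
    | none => 0

-- ===== PRECONDITION & SPEC =====
-- Pre_solve admits exactly the inputs on which A terminates with a value, except n ≤ 0:
-- n is the cycle length, so non-positive n is outside the natural domain (A's negative-index
-- wraparound there is accidental).  For 1 ≤ n it covers both n ≤ len(a) (A returns unless the
-- cycle sum is ≤ 0 with no first-cycle prefix exceeding x, where A loops forever) and
-- n > len(a) (A returns iff some prefix of a exceeds x before the IndexError at index len(a)).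
def Pre_solve (n : Int) (a : List Int) (x : Int) : Prop :=
  1 ≤ n ∧
  ((n ≤ a.length ∧ (0 < (a.take n.toNat).sum ∨ ∃ j < n.toNat, x < (a.take (j + 1)).sum)) ∨
   ((a.length : Int) < n ∧ ∃ j < a.length, x < (a.take (j + 1)).sum))
instance (n : Int) (a : List Int) (x : Int) : Decidable (Pre_solve n a x) := by unfold Pre_solve; infer_instance

def pvWitness_solve : Int × List Int × Int := (2, [3, -1], 4)

def Spec_solve (n : Int) (a : List Int) (x : Int) (out : Int) : Prop := out = solve_alt n a x
instance (n : Int) (a : List Int) (x : Int) (out : Int) : Decidable (Spec_solve n a x out) := by unfold Spec_solve; infer_instance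

-- ===== CLAIM (what is proved, stated in full; the proofs are below) =====
def Claim_equal_solve : Prop := ∀ (n : Int) (a : List Int) (x : Int), Dom_solve n a x → Pre_solve n a x → Spec_solve n a x (solve n a x)

-- ===== LEMMAS AND PROOFS =====

-- cumulative cyclic prefix sum: cpref cyc i = a[0%n]+…+a[(i-1)%n]
def cpref (cyc : List Int) : Nat → Int
  | 0 => 0
  | i + 1 => cpref cyc i + cyc.getD (i % cyc.length) 0

lemma cpref_eq_take_sum (cyc : List Int) : ∀ r, r ≤ cyc.length → cpref cyc r = (cyc.take r).sum := by
  intro r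
  induction r with
  | zero => intro _; simp [cpref]
  | succ r ih =>
    intro h
    have hr : r < cyc.length := by omega
    rw [cpref, ih (by omega), Nat.mod_eq_of_lt hr, List.sum_take_succ cyc r hr,
        List.getD_eq_getElem?_getD, List.getElem?_eq_getElem hr]
    rfl

lemma cpref_add_len (cyc : List Int) (_h : cyc ≠ []) (i : Nat) :
    cpref cyc (i + cyc.length) = cyc.sum + cpref cyc i := by
  induction i with
  | zero =>
    have := cpref_eq_take_sum cyc cyc.length le_rfl
    simpa [cpref] using this
  | succ i ih =>
    have : i + 1 + cyc.length = (i + cyc.length) + 1 := by omega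
    rw [this, cpref, ih, Nat.add_mod_right, cpref]
    ring

lemma cpref_cycle (cyc : List Int) (_h : cyc ≠ []) (m r : Nat) :
    cpref cyc (m * cyc.length + r) = m * cyc.sum + cpref cyc r := by
  induction m with
  | zero => simp
  | succ m ih =>
    have : (m + 1) * cyc.length + r = (m * cyc.length + r) + cyc.length := by ring
    rw [this, cpref_add_len cyc _h, ih]
    push_cast
    ring

lemma fold_pref (l : List Int) : ∀ (acc : List Int) (s : Int),
    (l.foldl (fun (st : List Int × Int) v => (st.1 ++ [st.2 + v], st.2 + v)) (acc, s))
      = (acc ++ (List.range l.length).map (fun j => s + (l.take (j + 1)).sum), s + l.sum) := by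
  induction l with
  | nil => intro acc s; simp
  | cons v r ih =>
    intro acc s
    rw [List.foldl_cons, ih]
    refine Prod.ext ?_ (by simp; ring)
    simp only [List.length_cons, List.range_succ_eq_map, List.map_cons, List.map_map]
    simp [List.append_assoc, Function.comp, add_assoc]

lemma firstExceed_some (t : Int) : ∀ (l : List Int) (j u : Nat), u < l.length → l.getD u 0 > t →
    (∀ v < u, ¬ l.getD v 0 > t) → firstExceed t l j = some (j + u + 1) := by
  intro l
  induction l with
  | nil => intro j u hu; simp at hu
  | cons p rest ih =>
    intro j u hu hgt hmin
    cases u with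
    | zero =>
      simp only [List.getD_cons_zero] at hgt
      rw [firstExceed, if_pos hgt]
    | succ u =>
      have h0 : ¬ p > t := by simpa using hmin 0 (by omega)
      rw [firstExceed, if_neg h0,
          ih (j + 1) u (by simpa using hu) (by simpa using hgt)
            (fun v hv => by simpa using hmin (v + 1) (by omega))]
      congr 1
      omega

lemma getD_mem_of_lt (l : List Int) (i : Nat) (h : i < l.length) : l.getD i 0 ∈ l := by
  rw [List.getD_eq_getElem?_getD, List.getElem?_eq_getElem h]
  exact List.getElem_mem h

lemma getD_take_eq (a : List Int) (k i : Nat) (h : i < k) : (a.take k).getD i 0 = a.getD i 0 := by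
  rw [List.getD_eq_getElem?_getD, List.getD_eq_getElem?_getD, List.getElem?_take_of_lt h]

lemma pref_getD (cyc : List Int) (u : Nat) (hu : u < cyc.length) :
    ((List.range cyc.length).map (fun j => 0 + (cyc.take (j + 1)).sum)).getD u 0 = cpref cyc (u + 1) := by
  rw [List.getD_eq_getElem?_getD, List.getElem?_map, List.getElem?_range hu,
      cpref_eq_take_sum cyc (u + 1) (by omega)]
  simp

lemma Q_of_prefix (n : Int) (a : List Int) (x : Int) (j : Nat) (hjn : j < n.toNat)
    (hja : j < a.length) (hx : x < (a.take (j + 1)).sum) :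
    x < cpref (a.take n.toNat) (j + 1) := by
  have htt : (a.take n.toNat).take (j + 1) = a.take (j + 1) := by
    rw [List.take_take]; congr 1; omega
  rw [cpref_eq_take_sum (a.take n.toNat) (j + 1) (by rw [List.length_take]; omega), htt]
  exact hx

lemma pre_ex' (n : Int) (a : List Int) (x : Int) (hpre : Pre_solve n a x) :
    ∃ i, x < cpref (a.take n.toNat) (i + 1) ∧ i + 1 ≤ (x.natAbs + 1) * n.toNat + n.toNat := by
  obtain ⟨hn1, hterm⟩ := hpre
  have hn' : 1 ≤ n.toNat := by omega
  rcases hterm with ⟨hna, hS | ⟨j, hj, hx⟩⟩ | ⟨hgt, j, hj, hx⟩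
  · -- cycle sum positive: after enough full cycles the sum exceeds x
    have hlen : (a.take n.toNat).length = n.toNat := by
      rw [List.length_take]; omega
    set cyc := a.take n.toNat with hcyc
    have hne : cyc ≠ [] := by
      intro h0; rw [h0] at hlen; simp at hlen; omega
    set m := x.natAbs + 1 with hm
    refine ⟨m * n.toNat - 1, ?_, by
      have h9 : 1 ≤ (x.natAbs + 1) * n.toNat := Nat.one_le_iff_ne_zero.mpr (Nat.mul_ne_zero (by omega) (by omega))
      rw [hm]; omega⟩
    have h1 : m * n.toNat - 1 + 1 = m * cyc.length + 0 := by
      rw [hlen]; have : 1 ≤ m * n.toNat := Nat.one_le_iff_ne_zero.mpr (by positivity); omega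
    rw [h1, cpref_cycle cyc hne m 0]
    have h2 : (m : Int) * 1 ≤ (m : Int) * cyc.sum := by
      apply mul_le_mul_of_nonneg_left (by exact_mod_cast hS) (by positivity)
    have h3 : x < (m : Int) := by
      rw [hm]; omega
    simp only [cpref]
    nlinarith
  · exact ⟨j, Q_of_prefix n a x j hj (by omega) hx, by omega⟩
  · exact ⟨j, Q_of_prefix n a x j (by omega) hj hx, by omega⟩

lemma pre_ex (n : Int) (a : List Int) (x : Int) (hpre : Pre_solve n a x) :
    ∃ i, x < cpref (a.take n.toNat) (i + 1) := by
  obtain ⟨i, h, _⟩ := pre_ex' n a x hpre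
  exact ⟨i, h⟩

lemma safe_get (n : Int) (a : List Int) (hn1 : 1 ≤ n) (j : Nat)
    (hcase : n ≤ a.length ∨ j < a.length) :
    PySem.List.pyGetD a (PySem.Int.mod (j : Int) n) 0
      = (a.take n.toNat).getD (j % (a.take n.toNat).length) 0 := by
  have hmod : PySem.Int.mod (j : Int) n = ((j % n.toNat : Nat) : Int) := by
    conv_lhs => rw [show n = (n.toNat : Int) from (Int.toNat_of_nonneg (by omega)).symm]
    rw [PySem.Int.mod_natCast]
  by_cases hna : n ≤ a.length
  · have hlen : (a.take n.toNat).length = n.toNat := by rw [List.length_take]; omega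
    have hjlt : j % n.toNat < n.toNat := Nat.mod_lt _ (by omega)
    rw [hmod, PySem.List.pyGetD_natCast, hlen, getD_take_eq a n.toNat _ hjlt]
  · have hja : j < a.length := by tauto
    have hfull : a.take n.toNat = a := List.take_of_length_le (by omega)
    have hj1 : j % n.toNat = j := Nat.mod_eq_of_lt (by omega)
    rw [hmod, hj1, PySem.List.pyGetD_natCast, hfull, Nat.mod_eq_of_lt hja]

lemma loop_eq (n x : Int) (a : List Int)
    (hex : ∃ i, x < cpref (a.take n.toNat) (i + 1))
    (hsafe : ∀ j ≤ Nat.find hex, PySem.List.pyGetD a (PySem.Int.mod (j : Int) n) 0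
      = (a.take n.toNat).getD (j % (a.take n.toNat).length) 0) :
    ∀ fuel j, j ≤ Nat.find hex → Nat.find hex + 1 ≤ j + fuel →
      solveLoop n x a fuel (cpref (a.take n.toNat) j) (j : Int) = ((Nat.find hex : Int) + 1) := by
  intro fuel
  induction fuel with
  | zero => intro j h1 h2; omega
  | succ fuel ih =>
    intro j h1 h2
    have hstep : cpref (a.take n.toNat) j + PySem.List.pyGetD a (PySem.Int.mod (j : Int) n) 0
        = cpref (a.take n.toNat) (j + 1) := by
      rw [hsafe j h1, cpref]
    simp only [solveLoop, hstep]
    by_cases hc : x < cpref (a.take n.toNat) (j + 1)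
    · rw [if_pos (by exact hc)]
      have hle : Nat.find hex ≤ j := Nat.find_le hc
      have : j = Nat.find hex := by omega
      rw [this]
    · rw [if_neg (by exact hc)]
      have hne : j ≠ Nat.find hex := by
        intro h; exact hc (h ▸ Nat.find_spec hex)
      have : ((j : Int) + 1) = ((j + 1 : Nat) : Int) := by push_cast; ring
      rw [this]
      exact ih (j + 1) (by omega) (by omega)

lemma solve_eq (n : Int) (a : List Int) (x : Int) (hpre : Pre_solve n a x) :
    solve n a x = ((Nat.find (pre_ex n a x hpre) : Int) + 1) := by
  have hex := pre_ex n a x hpre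
  have hpre' := hpre
  obtain ⟨hn1, hterm⟩ := hpre'
  obtain ⟨w, hw, hwb⟩ := pre_ex' n a x hpre
  have hfw : Nat.find hex ≤ w := Nat.find_min' hex hw
  have hmul : (x.natAbs + 1) * n.toNat ≤ (x.natAbs + (a.map Int.natAbs).sum + 1) * n.toNat :=
    Nat.mul_le_mul_right _ (by omega)
  have hsafe : ∀ j ≤ Nat.find hex, PySem.List.pyGetD a (PySem.Int.mod (j : Int) n) 0
      = (a.take n.toNat).getD (j % (a.take n.toNat).length) 0 := by
    intro j hj
    rcases hterm with ⟨hna, _⟩ | ⟨hgt, j0, hj0, hx0⟩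
    · exact safe_get n a hn1 j (Or.inl hna)
    · have hfl : Nat.find hex ≤ j0 :=
        Nat.find_min' hex (Q_of_prefix n a x j0 (by omega) hj0 hx0)
      exact safe_get n a hn1 j (Or.inr (by omega))
  unfold solve
  exact loop_eq n x a hex hsafe _ 0 (Nat.zero_le _) (by omega)

lemma alt_eq (n : Int) (a : List Int) (x : Int) (hpre : Pre_solve n a x) :
    solve_alt n a x = ((Nat.find (pre_ex n a x hpre) : Int) + 1) := by
  have hex := pre_ex n a x hpre
  have hpre' := hpre
  obtain ⟨hn1, hterm⟩ := hpre'
  have hn' : 1 ≤ n.toNat := by omega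
  simp only [solve_alt, PySem.List.slice_to a (show (0:Int) ≤ n by omega), fold_pref, List.nil_append]
  set cyc := a.take n.toNat with hcyc
  have hL1 : 1 ≤ cyc.length := by
    rw [hcyc, List.length_take]
    rcases hterm with ⟨hna, _⟩ | ⟨_, j, hj, _⟩ <;> omega
  set pref := List.map (fun j => 0 + (List.take (j + 1) cyc).sum) (List.range cyc.length) with hpref
  have hplen : pref.length = cyc.length := by rw [hpref]; simp
  have hpne : pref ≠ [] := by
    intro h; rw [h] at hplen; simp at hplen; omega
  have hD : ∀ u, u < cyc.length → pref.getD u 0 = cpref cyc (u + 1) := by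
    intro u hu
    exact pref_getD cyc u hu
  obtain ⟨b, hmax⟩ : ∃ b, PySem.List.max? pref (fun y => y) = some b := by
    cases h : PySem.List.max? pref (fun y => y) with
    | none => exact absurd ((PySem.List.max?_eq_none_iff pref _).mp h) hpne
    | some b => exact ⟨b, rfl⟩
  have hbmem := PySem.List.max?_mem hmax
  have hbmax : ∀ y ∈ pref, y ≤ b := PySem.List.max?_isMax hmax
  obtain ⟨u, hu, hub⟩ := List.getElem_of_mem hbmem
  have hu' : u < cyc.length := by rw [hplen] at hu; exact hu
  have huD : pref.getD u 0 = b := by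
    rw [List.getD_eq_getElem?_getD, List.getElem?_eq_getElem hu]; simpa using hub
  rw [hmax]
  simp only [Option.getD_some]
  by_cases hbx : b > x
  · rw [if_pos hbx]
    have hQu : x < cpref cyc (u + 1) := by
      rw [← hD u hu']; rw [huD]; exact hbx
    have hfu : Nat.find hex ≤ u := Nat.find_min' hex hQu
    rw [firstExceed_some x pref 0 (Nat.find hex) (by omega)
        (by rw [hD _ (by omega)]; exact Nat.find_spec hex)
        (fun v hv => by rw [hD v (by omega)]; exact Nat.find_min hex hv)]
    push_cast
    ring
  · rw [if_neg hbx]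
    have hble : b ≤ x := not_lt.mp hbx
    have hall : ∀ v, v < cyc.length → cpref cyc (v + 1) ≤ x := by
      intro v hv
      have hm := hbmax _ (getD_mem_of_lt pref v (by omega))
      rw [hD v hv] at hm; omega
    -- b ≤ x rules out Pre_solve's n > len(a) branch and its first-cycle-prefix disjunct
    have hlenmin : cyc.length = min n.toNat a.length := by rw [hcyc, List.length_take]
    have hprefix_exceed : ∀ j, j < n.toNat → j < a.length → ¬ x < (a.take (j + 1)).sum := by
      intro j hjn hja hx
      have hQ : x < cpref cyc (j + 1) := Q_of_prefix n a x j hjn hja hx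
      have := hall j (by omega)
      omega
    obtain ⟨hna, hS⟩ : n ≤ (a.length : Int) ∧ 0 < cyc.sum := by
      rcases hterm with ⟨hna, hS | ⟨j, hj, hx⟩⟩ | ⟨hgt, j, hj, hx⟩
      · exact ⟨hna, hS⟩
      · exact absurd hx (hprefix_exceed j hj (by omega))
      · exact absurd hx (hprefix_exceed j (by omega) hj)
    have hlen : cyc.length = n.toNat := by rw [hlenmin]; omega
    have hne : cyc ≠ [] := by
      intro h; rw [h] at hlen; simp at hlen; omega
    have hSval : PySem.List.pyGetD pref (-1) 0 = cyc.sum := by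
      rw [PySem.List.pyGetD_neg_one pref 0 hpne, List.getLast_eq_getElem]
      have h1 : pref.length - 1 < cyc.length := by omega
      have h3 := hD (pref.length - 1) h1
      rw [List.getD_eq_getElem?_getD, List.getElem?_eq_getElem (by omega)] at h3
      simp only [Option.getD_some] at h3
      rw [h3, show pref.length - 1 + 1 = cyc.length by omega,
          cpref_eq_take_sum cyc cyc.length le_rfl, List.take_length]
    rw [hSval]
    set q := PySem.Int.floordiv (x - b) cyc.sum with hq
    have hqle : q * cyc.sum ≤ x - b := (PySem.Int.le_floordiv_iff_mul_le hS).mp (le_of_eq hq)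
    have hqlt : x - b < (q + 1) * cyc.sum :=
      (PySem.Int.floordiv_lt_iff_lt_mul hS).mp (by rw [← hq]; exact lt_add_one q)
    have hq0 : 0 ≤ q := by
      rw [hq]; exact (PySem.Int.le_floordiv_iff_mul_le hS).mpr (by simp; omega)
    have hK : (((q + 1).toNat : Int)) = q + 1 := Int.toNat_of_nonneg (by omega)
    have hrem : x - (q + 1) * cyc.sum < b := by linarith
    have hRex : ∃ v, x - (q + 1) * cyc.sum < pref.getD v 0 := ⟨u, by rw [huD]; exact hrem⟩
    have hRt0 : x - (q + 1) * cyc.sum < pref.getD (Nat.find hRex) 0 := Nat.find_spec hRex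
    have ht0u : Nat.find hRex ≤ u := Nat.find_min' hRex (by rw [huD]; exact hrem)
    have ht0lt : Nat.find hRex < n.toNat := by omega
    rw [firstExceed_some _ pref 0 (Nat.find hRex) (by omega) hRt0
        (fun v hv => Nat.find_min hRex hv)]
    have hfind : Nat.find hex = (q + 1).toNat * n.toNat + Nat.find hRex := by
      rw [Nat.find_eq_iff]
      constructor
      · rw [show (q + 1).toNat * n.toNat + Nat.find hRex + 1
              = (q + 1).toNat * cyc.length + (Nat.find hRex + 1) by rw [hlen]; omega,
          cpref_cycle cyc hne, ← hD _ (by omega), hK]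
        linarith
      · intro i hi hQ
        have hrn : i % n.toNat < n.toNat := Nat.mod_lt _ (by omega)
        have him : i / n.toNat * n.toNat + i % n.toNat = i := by
          rw [Nat.mul_comm]; exact Nat.div_add_mod i n.toNat
        rw [show i + 1 = i / n.toNat * cyc.length + (i % n.toNat + 1) by rw [hlen]; omega,
            cpref_cycle cyc hne, ← hD _ (by omega)] at hQ
        have hKn : (q + 1).toNat * n.toNat + n.toNat = ((q + 1).toNat + 1) * n.toNat := by ring
        have hmlt : i / n.toNat < (q + 1).toNat + 1 :=
          (Nat.div_lt_iff_lt_mul (by omega)).mpr (by omega)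
        rcases Nat.lt_succ_iff_lt_or_eq.mp hmlt with hmlt2 | hmeq
        · have hm1 : ((i / n.toNat : Nat) : Int) ≤ q := by
            have h5 : ((i / n.toNat : Nat) : Int) < ((q + 1).toNat : Int) := by exact_mod_cast hmlt2
            rw [hK] at h5; omega
          have hgb : pref.getD (i % n.toNat) 0 ≤ b := hbmax _ (getD_mem_of_lt pref _ (by omega))
          have hms : ((i / n.toNat : Nat) : Int) * cyc.sum ≤ q * cyc.sum :=
            mul_le_mul_of_nonneg_right hm1 (le_of_lt hS)
          linarith
        · have him2 : (q + 1).toNat * n.toNat + i % n.toNat = i := by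
            rw [← hmeq]; exact him
          have hrt : i % n.toNat < Nat.find hRex := by omega
          have hnr := Nat.find_min hRex hrt
          rw [hmeq, hK] at hQ
          simp only [not_lt] at hnr
          linarith
    rw [hfind]
    rw [show n = (n.toNat : Int) from (Int.toNat_of_nonneg (by omega)).symm]
    push_cast [hK]
    simp only [Int.toNat_natCast]
    ring

theorem solve_spec : Claim_equal_solve := by
  intro n a x _ hpre
  unfold Spec_solve
  rw [solve_eq n a x hpre, alt_eq n a x hpre]
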